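-- pv_equiv track=rewrite | github.com/ngjingyuen1028/logic-circuit-generator-from-canonicals | Canonicals to SoP_PoS Implementation.py | num_to_binary
-- ===== SOURCE A (Python) =====
-- def num_to_binary(num_list):
--
--     #convert list of decimals to binary list with sorted number of 1's
--     #eg : [0,2,3,4,7,8,9] to [['0000'], ['0010', '0100', '1000'], ['0011', '1001'], ['0111']]
--
--     binary_list = []   #empty list to hold the numbers converted into binarys
--     num_list.sort()    #sort the inputs
--
--      #to find out minimum amount of bits required to represent the binary number
--     max_num = max(num_list)
--     n = 0
--     while 2**n <= max_num:
--         n +=1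
--
--
--     for number in num_list:
--         binary_str = bin(number)[2:].zfill(n)     #to convert the numbers into binary
--         binary_list.append(binary_str)
--
--     #to group the binary into different list based on the number of 1's in the number
--     nested_list = []
--     for i in range(n+1):
--         temp_list = []
--         for binary_str in binary_list:
--             count_ones = binary_str.count('1')
--             if i == count_ones:
--                 temp_list.append(binary_str)
--
--         if temp_list != []:
--             nested_list.append(temp_list)
--
--     return nested_list,n
-- ===== SOURCE B (Python) =====
-- def num_to_binary(num_list):
--     # One pass: bucket each zero-padded binary string by its popcount,
--     # then emit the non-empty buckets for counts 0..n in order.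
--     # Like the original, this sorts num_list in place.
--     num_list.sort()
--     max_num = num_list[-1]
--     n = max_num.bit_length() if max_num > 0 else 0
--     buckets = {}
--     for number in num_list:
--         s = bin(number)[2:].zfill(n)
--         buckets.setdefault(s.count('1'), []).append(s)
--     return [buckets[c] for c in range(n + 1) if c in buckets], n
-- ===== Notes on version B (the rewrite author's own statement) =====
-- stated objective: faster
-- what changed: Instead of scanning the whole binary list once per candidate popcount (recounting ones each time), B buckets each string by its popcount in a single dict pass and emits the non-empty buckets for counts 0..n; n comes from bit_length and the maximum is the sorted list's last element.
import Mathlib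
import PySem

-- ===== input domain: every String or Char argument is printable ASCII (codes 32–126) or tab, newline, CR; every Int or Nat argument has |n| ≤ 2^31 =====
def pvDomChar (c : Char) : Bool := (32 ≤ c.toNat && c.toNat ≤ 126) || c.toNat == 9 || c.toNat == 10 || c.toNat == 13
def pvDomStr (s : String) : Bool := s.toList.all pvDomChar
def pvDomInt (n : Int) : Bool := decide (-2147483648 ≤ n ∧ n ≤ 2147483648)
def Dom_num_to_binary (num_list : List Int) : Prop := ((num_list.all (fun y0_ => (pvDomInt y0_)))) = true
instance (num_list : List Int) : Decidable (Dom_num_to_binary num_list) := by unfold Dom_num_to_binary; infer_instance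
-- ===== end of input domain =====

-- B buckets each zero-padded binary string by its popcount in one dict pass instead of
-- rescanning the whole list for every candidate count; both A and B sort num_list in place
-- (the equivalence proved here is about the return value; B performs the same mutation).

-- ===== PORT A =====

-- A's 'while 2**n <= max_num: n += 1' loop, literally.
def pvBitLoop (m : Int) (n : Nat) : Nat :=
  if (2 : Int) ^ n ≤ m then pvBitLoop m (n + 1) else n
termination_by m.toNat - n
decreasing_by
  rename_i h
  have h1 : (n : Int) < (2 : Int) ^ n := by
    have := Nat.lt_two_pow_self (n := n)
    exact_mod_cast this
  omega

def num_to_binary (num_list : List Int) : List (List String) × Int :=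
  let sorted_list := PySem.List.sorted num_list (fun x => x) false
  match PySem.List.max? sorted_list (fun x => x) with
  | none => ([], 0)  -- Python: max([]) raises ValueError; excluded by Pre_
  | some max_num =>
    let n := pvBitLoop max_num 0
    let binary_list := sorted_list.foldl (fun acc number =>
      acc ++ [PySem.Str.zfill (PySem.Str.slice (PySem.Int.pyBin number) (some 2) none) (n : Int)]) []
    let nested_list := (PySem.List.pyRange 0 ((n : Int) + 1) 1).foldl (fun acc i =>
      let temp_list := binary_list.foldl (fun t bs =>
        if i == (PySem.Str.count bs "1" : Int) then t ++ [bs] else t) []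
      if temp_list ≠ [] then acc ++ [temp_list] else acc) []
    (nested_list, (n : Int))

-- ===== PORT B =====

def num_to_binary_alt (num_list : List Int) : List (List String) × Int :=
  let sorted_list := PySem.List.sorted num_list (fun x => x) false
  match PySem.List.pyGet? sorted_list (-1) with
  | none => ([], 0)  -- Python: num_list[-1] raises IndexError on []; excluded by Pre_
  | some max_num =>
    let n : Nat := if 0 < max_num then PySem.Int.bitLength max_num else 0
    let buckets := sorted_list.foldl (fun d number =>
      let bs := PySem.Str.zfill (PySem.Str.slice (PySem.Int.pyBin number) (some 2) none) (n : Int)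
      d.modify ((PySem.Str.count bs "1" : Int)) [] (· ++ [bs])) (PySem.Dict.empty)
    let res := (PySem.List.pyRange 0 ((n : Int) + 1) 1).foldl (fun acc c =>
      if buckets.contains c then acc ++ [buckets.getD c []] else acc) []
    (res, (n : Int))

-- ===== PRECONDITION & SPEC =====
-- Pre_ excludes only the empty list, on which A raises ValueError (max of empty sequence).
def Pre_num_to_binary (num_list : List Int) : Prop := num_list ≠ []
instance (num_list : List Int) : Decidable (Pre_num_to_binary num_list) := by
  unfold Pre_num_to_binary; infer_instance

def pvWitness_num_to_binary : List Int := [3, 0, 5]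

def Spec_num_to_binary (num_list : List Int) (out : List (List String) × Int) : Prop := out = num_to_binary_alt num_list
instance (num_list : List Int) (out : List (List String) × Int) : Decidable (Spec_num_to_binary num_list out) := by unfold Spec_num_to_binary; infer_instance

-- ===== CLAIM (what is proved, stated in full; the proofs are below) =====
def Claim_equal_num_to_binary : Prop := ∀ (num_list : List Int), Dom_num_to_binary num_list → Pre_num_to_binary num_list → Spec_num_to_binary num_list (num_to_binary num_list)

-- ===== LEMMAS AND PROOFS =====

-- A's bit-counting while loop agrees with B's bit_length expression.
theorem pvBitLoop_eq_bitLength (m : Int) (hm : 0 < m) :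
    ∀ j k, PySem.Int.bitLength m - k ≤ j → k ≤ PySem.Int.bitLength m →
      pvBitLoop m k = PySem.Int.bitLength m := by
  intro j
  induction j with
  | zero =>
    intro k hj hk
    have hk' : k = PySem.Int.bitLength m := by omega
    subst hk'
    rw [pvBitLoop]
    have hlt := PySem.Int.lt_two_pow_bitLength m
    have habs : (m.natAbs : Int) = m := Int.natAbs_of_nonneg hm.le
    have hup : m < (2 : Int) ^ PySem.Int.bitLength m := by
      calc m = (m.natAbs : Int) := habs.symm
        _ < ((2 ^ PySem.Int.bitLength m : Nat) : Int) := by exact_mod_cast hlt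
        _ = (2 : Int) ^ PySem.Int.bitLength m := by push_cast; ring
    rw [if_neg (not_le.mpr hup)]
  | succ j ih =>
    intro k hj hk
    rw [pvBitLoop]
    have habs : (m.natAbs : Int) = m := Int.natAbs_of_nonneg hm.le
    by_cases h : (2 : Int) ^ k ≤ m
    · rw [if_pos h]
      have hklt : k < PySem.Int.bitLength m := by
        by_contra hge
        rw [not_lt] at hge
        have hlt := PySem.Int.lt_two_pow_bitLength m
        have h1 : m < (2 : Int) ^ PySem.Int.bitLength m := by
          calc m = (m.natAbs : Int) := habs.symm
            _ < ((2 ^ PySem.Int.bitLength m : Nat) : Int) := by exact_mod_cast hlt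
            _ = (2 : Int) ^ PySem.Int.bitLength m := by push_cast; ring
        have h2 : (2 : Int) ^ PySem.Int.bitLength m ≤ (2 : Int) ^ k :=
          pow_le_pow_right₀ (by norm_num) hge
        omega
      exact ih (k + 1) (by omega) (by omega)
    · rw [if_neg h]
      rw [not_le] at h
      have hne : m ≠ 0 := by omega
      have hle := PySem.Int.two_pow_bitLength_le m hne
      have h5 : (2 : Int) ^ (PySem.Int.bitLength m - 1) ≤ m := by
        calc (2 : Int) ^ (PySem.Int.bitLength m - 1)
            = ((2 ^ (PySem.Int.bitLength m - 1) : Nat) : Int) := by push_cast; ring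
          _ ≤ (m.natAbs : Int) := by exact_mod_cast hle
          _ = m := habs
      have h6 : (PySem.Int.bitLength m - 1) < k := by
        by_contra hge
        rw [not_lt] at hge
        have := pow_le_pow_right₀ (a := (2 : Int)) (by norm_num) hge
        omega
      omega

theorem pvBitLoop_zero_eq (m : Int) :
    pvBitLoop m 0 = if 0 < m then PySem.Int.bitLength m else 0 := by
  by_cases hm : 0 < m
  · have hbl : 0 < PySem.Int.bitLength m := by
      by_contra h0
      rw [not_lt] at h0
      have hz : PySem.Int.bitLength m = 0 := by omega
      have hlt := PySem.Int.lt_two_pow_bitLength m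
      rw [hz] at hlt
      simp at hlt
      omega
    rw [pvBitLoop_eq_bitLength m hm (PySem.Int.bitLength m) 0 (by omega) (by omega), if_pos hm]
  · rw [pvBitLoop]
    have h0 : ¬ (2 : Int) ^ 0 ≤ m := by rw [pow_zero]; omega
    rw [if_neg h0, if_neg hm]

-- the last element of a ≤-sorted list bounds every element
theorem pv_getLast_isMax (xs : List Int) (h : xs.Pairwise (· ≤ ·)) (hne : xs ≠ []) :
    ∀ y ∈ xs, y ≤ xs.getLast hne := by
  induction xs with
  | nil => simp at hne
  | cons a t ih =>
    intro y hy
    rcases List.pairwise_cons.mp h with ⟨ha, ht⟩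
    by_cases hte : t = []
    · subst hte; simp at hy; simp [hy, List.getLast]
    · rw [List.getLast_cons hte]
      rcases List.mem_cons.mp hy with rfl | hyt
      · exact ha _ (List.getLast_mem hte)
      · exact ih ht hte y hyt

-- A's max() agrees with B's xs[-1] on a ≤-sorted nonempty list
theorem pv_max_eq_last (xs : List Int) (h : xs.Pairwise (· ≤ ·)) (hne : xs ≠ []) :
    PySem.List.max? xs (fun x => x) = PySem.List.pyGet? xs (-1) := by
  obtain ⟨a, t, rfl⟩ := List.exists_cons_of_ne_nil hne
  rw [PySem.List.max?_id_cons, PySem.List.pyGet?_neg_one,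
    List.getLast?_eq_some_getLast (l := a :: t) (by simp)]
  congr 1
  have h1 := PySem.List.le_foldl_max t a
  have hmem : t.foldl max a ∈ a :: t := by
    rcases PySem.List.foldl_max_mem t a with h' | h'
    · rw [h']; exact List.mem_cons_self
    · exact List.mem_cons_of_mem a h'
  have hlastmem : (a :: t).getLast (by simp) ∈ a :: t := List.getLast_mem (by simp)
  have hub : t.foldl max a ≤ (a :: t).getLast (by simp) :=
    pv_getLast_isMax (a :: t) h (by simp) _ hmem
  have hlb : (a :: t).getLast (by simp) ≤ t.foldl max a := by
    rcases List.mem_cons.mp hlastmem with heq | hmem'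
    · rw [heq]; exact h1.1
    · exact h1.2 _ hmem'
  omega

-- ===== VERDICT (by name: the statement is the Claim_ definition above) =====
theorem num_to_binary_spec : Claim_equal_num_to_binary := by
  intro num_list _ hpre
  unfold Spec_num_to_binary num_to_binary num_to_binary_alt
  dsimp only
  have hsne : PySem.List.sorted num_list (fun x => x) false ≠ [] := by
    rw [Ne, PySem.List.sorted_eq_nil_iff]; exact hpre
  have hpw : (PySem.List.sorted num_list (fun x => x) false).Pairwise (· ≤ ·) := by
    have := PySem.List.sorted_pairwise (xs := num_list) (key := fun x => x)
    simpa using this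
  rw [pv_max_eq_last _ hpw hsne]
  set s := PySem.List.sorted num_list (fun x => x) false with hs
  rcases hM : PySem.List.pyGet? s (-1) with _ | max_num
  · rfl
  · dsimp only
    rw [pvBitLoop_zero_eq]
    set n : Nat := if 0 < max_num then PySem.Int.bitLength max_num else 0 with hn
    set f : Int → String := fun x =>
      PySem.Str.zfill (PySem.Str.slice (PySem.Int.pyBin x) (some 2) none) (n : Int) with hf
    set k : Int → Int := fun x => (PySem.Str.count (f x) "1" : Int) with hk
    -- A's binary_list is the map of f over s
    rw [PySem.List.foldl_append_singleton_eq_map]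
    simp only [List.nil_append]
    -- B's bucket dict, as a fold over key/value pairs
    have hbuck : (s.foldl (fun d number =>
        d.modify ((PySem.Str.count (f number) "1" : Int)) [] (· ++ [f number])) PySem.Dict.empty)
        = ((s.map (fun x => (k x, f x))).foldl
            (fun d p => d.modify p.1 [] (· ++ [p.2])) PySem.Dict.empty) := by
      rw [List.foldl_map]
    rw [hbuck]
    set B := ((s.map (fun x => (k x, f x))).foldl
        (fun d p => d.modify p.1 [] (· ++ [p.2])) PySem.Dict.empty) with hB
    set filt : Int → List String := fun c => (s.filter (fun x => k x == c)).map f with hfilt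
    have hgetD : ∀ c : Int, B.getD c [] = filt c := by
      intro c
      rw [hB, PySem.Dict.getD_foldl_modify_append, hfilt]
      simp [List.filter_map, Function.comp_def]
    have hcont : ∀ c : Int, B.contains c = decide (filt c ≠ []) := by
      intro c
      have hkeys : B.keys = PySem.Set.ofList (s.map k) := by
        rw [hB, PySem.Dict.keys_foldl_modify_key
          (l := s.map (fun x => (k x, f x))) (key := fun p : Int × String => p.1)
          (d0 := ([] : List String)) (f := fun _ p => (· ++ [p.2]))
          (d := (PySem.Dict.empty : PySem.Dict Int (List String)))]
        simp [PySem.Dict.keys_empty, List.map_map, Function.comp_def,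
          PySem.Set.update_nil_left]
      have h1 : B.contains c = true ↔ c ∈ s.map k := by
        rw [PySem.Dict.contains_iff_mem_keys, hkeys, PySem.Set.mem_ofList]
      have h2 : (filt c ≠ []) ↔ c ∈ s.map k := by
        simp only [hfilt]
        constructor
        · intro hne'
          have hc' : s.filter (fun x => k x == c) ≠ [] := by
            intro h0; rw [h0] at hne'; simp at hne'
          rcases List.exists_mem_of_ne_nil _ hc' with ⟨x, hx⟩
          rcases List.mem_filter.mp hx with ⟨hxs, hkx⟩
          exact List.mem_map.mpr ⟨x, hxs, by simpa using hkx⟩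
        · intro hmem
          rcases List.mem_map.mp hmem with ⟨x, hx, hkx⟩
          have hxf : x ∈ s.filter (fun x => k x == c) :=
            List.mem_filter.mpr ⟨hx, by simp [hkx]⟩
          intro h0
          rw [List.map_eq_nil_iff] at h0
          rw [h0] at hxf
          simp at hxf
      by_cases hc : filt c ≠ []
      · rw [decide_eq_true hc]
        exact h1.mpr (h2.mp hc)
      · rw [decide_eq_false hc]
        exact Bool.eq_false_iff.mpr (fun hT => hc (h2.mpr (h1.mp hT)))
    -- A's inner scan over (s.map f) is the filter
    have hinner : ∀ i : Int, ((s.map f).foldl (fun t bs =>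
        if i == (PySem.Str.count bs "1" : Int) then t ++ [bs] else t) [])
        = filt i := by
      intro i
      rw [PySem.List.foldl_append_if (p := fun bs => i == (PySem.Str.count bs "1" : Int))
        (f := fun bs => bs) (l := s.map f) (acc := [])]
      simp only [List.nil_append, List.map_id']
      rw [hfilt, List.filter_map]
      congr 1
      apply List.filter_congr
      intro x _
      simp [hk, Bool.beq_comm]
    -- both output folds have the append-if shape
    have hA : ((PySem.List.pyRange 0 ((n : Int) + 1) 1).foldl (fun acc i =>
        if ((s.map f).foldl (fun t bs =>
          if i == (PySem.Str.count bs "1" : Int) then t ++ [bs] else t) []) ≠ [] then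
          acc ++ [((s.map f).foldl (fun t bs =>
            if i == (PySem.Str.count bs "1" : Int) then t ++ [bs] else t) [])] else acc) [])
        = ((PySem.List.pyRange 0 ((n : Int) + 1) 1).filter
            (fun i => decide (filt i ≠ []))).map filt := by
      rw [PySem.List.foldl_append_ite
        (p := fun i => ((s.map f).foldl (fun t bs =>
          if i == (PySem.Str.count bs "1" : Int) then t ++ [bs] else t) []) ≠ [])
        (f := fun i => ((s.map f).foldl (fun t bs =>
          if i == (PySem.Str.count bs "1" : Int) then t ++ [bs] else t) []))
        (l := PySem.List.pyRange 0 ((n : Int) + 1) 1) (acc := [])]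
      simp only [List.nil_append]
      rw [List.filter_congr (fun i _ => by rw [hinner i]),
        List.map_congr_left (fun i _ => hinner i)]
    have hBout : ((PySem.List.pyRange 0 ((n : Int) + 1) 1).foldl (fun acc c =>
        if B.contains c then acc ++ [B.getD c []] else acc) [])
        = ((PySem.List.pyRange 0 ((n : Int) + 1) 1).filter
            (fun i => decide (filt i ≠ []))).map filt := by
      rw [PySem.List.foldl_append_if (p := fun c => B.contains c)
        (f := fun c => B.getD c []) (l := PySem.List.pyRange 0 ((n : Int) + 1) 1) (acc := [])]
      simp only [List.nil_append]
      rw [List.filter_congr (fun c _ => hcont c),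
        List.map_congr_left (fun c _ => hgetD c)]
    rw [hA, hBout]
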